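-- pv_equiv track=rewrite | github.com/dwavesystems/legacy-sapi-clients | python-client/test/test_reduce_degree.py | increase_degree
-- ===== SOURCE A (Python) =====
-- def increase_degree(terms, mapping):
--     mapping = dict((a, (i, j)) for a, i, j in mapping)
--     big_terms = []
--     for term in terms:
--         term = set(term)
--         done = False
--         while not done:
--             done = True
--             for v in tuple(term):
--                 if v in mapping:
--                     term.remove(v)
--                     term.update(mapping[v])
--                     done = False
--         big_terms.append(term)
--     return big_terms
-- ===== SOURCE B (Python) =====
-- def increase_degree(terms, mapping):
--     m = {a: (i, j) for a, i, j in mapping}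
--     memo = {}
--
--     def expand(v):
--         s = memo.get(v)
--         if s is None:
--             if v in m:
--                 i, j = m[v]
--                 s = expand(i) | expand(j)
--             else:
--                 s = {v}
--             memo[v] = s
--         return s
--
--     out = []
--     for term in terms:
--         s = set()
--         for v in term:
--             s |= expand(v)
--         out.append(s)
--     return out
-- ===== Notes on version B (the rewrite author's own statement) =====
-- stated objective: alternative
-- what changed: A repeatedly rescans each term-set, substituting mapped variables one pass at a time until a fixpoint; B computes each variable's full terminal expansion once by a memoized DFS over the mapping and unions the cached expansions per term (intended to avoid A's repeated rescans on chained mappings; a timing run could not confirm a speed-up, so none is claimed).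
import Mathlib
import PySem

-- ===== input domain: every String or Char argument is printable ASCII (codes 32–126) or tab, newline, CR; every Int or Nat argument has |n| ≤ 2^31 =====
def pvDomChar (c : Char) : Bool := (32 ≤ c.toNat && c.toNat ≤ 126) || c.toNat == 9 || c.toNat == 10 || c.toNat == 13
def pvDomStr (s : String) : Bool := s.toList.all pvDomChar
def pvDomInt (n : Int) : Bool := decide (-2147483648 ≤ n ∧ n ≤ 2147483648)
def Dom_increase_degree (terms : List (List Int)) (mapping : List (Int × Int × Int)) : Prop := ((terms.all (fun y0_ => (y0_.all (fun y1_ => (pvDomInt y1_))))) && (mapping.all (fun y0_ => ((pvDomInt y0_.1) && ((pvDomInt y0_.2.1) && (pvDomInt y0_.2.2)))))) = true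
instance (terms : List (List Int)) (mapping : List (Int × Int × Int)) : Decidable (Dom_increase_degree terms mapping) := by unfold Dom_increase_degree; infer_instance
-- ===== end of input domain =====

-- B replaces A's repeated substitute-until-fixpoint passes over each term-set by one memoized DFS
-- that computes every variable's terminal expansion once (alternative algorithm, same results).
-- Each returned Python set is rendered as its sorted element list (canonical: sets compare as finite
-- sets and Python's hash iteration order is not modelled).


-- ===== PORT A =====
-- mapping = dict((a, (i, j)) for a, i, j in mapping)
def idMapA (mapping : List (Int × Int × Int)) : PySem.Dict Int (Int × Int) :=
  mapping.foldl (fun d t => d.insert t.1 (t.2.1, t.2.2)) PySem.Dict.empty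

-- one 'for v in tuple(term)' body: v always ∈ term at its own iteration (earlier iterations remove
-- only their own snapshot element and otherwise add), so term.remove(v) = Set.discard st.1 v here.
def idPass (m : PySem.Dict Int (Int × Int)) (snap : List Int)
    (st : PySem.Set Int × Bool) : PySem.Set Int × Bool :=
  snap.foldl (fun st v =>
    match m.get? v with
    | some ij => (PySem.Set.update (PySem.Set.discard st.1 v) [ij.1, ij.2], false)
    | none => st) st

-- 'while not done': Python has no bound; under Pre_ (well-founded mapping, proved below) at most
-- mapping.length + 1 passes run before done=True, so this fuel makes exactly the same passes.
def idLoop (m : PySem.Dict Int (Int × Int)) : Nat → PySem.Set Int → PySem.Set Int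
  | 0, term => term
  | f + 1, term =>
    let st := idPass m term (term, true)
    if st.2 then st.1 else idLoop m f st.1

def increase_degree (terms : List (List Int)) (mapping : List (Int × Int × Int)) : List (List Int) :=
  let m := idMapA mapping
  terms.foldl (fun big term =>
    big ++ [PySem.List.sorted (idLoop m (mapping.length + 1) (PySem.Set.ofList term)) (fun x => x) false]) []

-- ===== PORT B =====
-- m = {a: (i, j) for a, i, j in mapping}
def altMap (mapping : List (Int × Int × Int)) : PySem.Dict Int (Int × Int) :=
  mapping.foldl (fun d t => d.insert t.1 (t.2.1, t.2.2)) PySem.Dict.empty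

-- def expand(v), memo threaded explicitly; recursion depth ≤ mapping.length + 1 under Pre_ (proved
-- below), so that fuel makes exactly Source B's calls; the fuel-0 arm is unreachable under Pre_.
def altExpand (m : PySem.Dict Int (Int × Int)) :
    Nat → Int → PySem.Dict Int (PySem.Set Int) → PySem.Set Int × PySem.Dict Int (PySem.Set Int)
  | 0, v, memo => ([v], memo)
  | f + 1, v, memo =>
    match memo.get? v with
    | some s => (s, memo)
    | none =>
      match m.get? v with
      | some ij =>
        let ri := altExpand m f ij.1 memo
        let rj := altExpand m f ij.2 ri.2
        let s := PySem.Set.union ri.1 rj.1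
        (s, rj.2.insert v s)
      | none =>
        let s : PySem.Set Int := PySem.Set.ofList [v]
        (s, memo.insert v s)

def increase_degree_alt (terms : List (List Int)) (mapping : List (Int × Int × Int)) : List (List Int) :=
  let m := altMap mapping
  (terms.foldl (fun (st : List (List Int) × PySem.Dict Int (PySem.Set Int)) term =>
      let r := term.foldl (fun (p : PySem.Set Int × PySem.Dict Int (PySem.Set Int)) v =>
          let rv := altExpand m (mapping.length + 1) v p.2
          (PySem.Set.union p.1 rv.1, rv.2)) (PySem.Set.empty, st.2)
      (st.1 ++ [PySem.List.sorted r.1 (fun x => x) false], r.2))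
    ([], PySem.Dict.empty)).1

-- ===== PRECONDITION & SPEC =====
def pvMapOf (mapping : List (Int × Int × Int)) : PySem.Dict Int (Int × Int) :=
  mapping.foldl (fun d t => d.insert t.1 (t.2.1, t.2.2)) PySem.Dict.empty

-- expansion depth of a variable in the substitution graph (none = no finite depth within the fuel)
def pvDepth? (m : PySem.Dict Int (Int × Int)) : Nat → Int → Option Nat
  | 0, v => match m.get? v with | none => some 0 | some _ => none
  | f + 1, v =>
    match m.get? v with
    | none => some 0
    | some ij =>
      match pvDepth? m f ij.1, pvDepth? m f ij.2 with
      | some a, some b => some (max a b + 1)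
      | _, _ => none

-- Pre_ excludes exactly the inputs on which A's while-loop never terminates: some term contains a
-- variable whose substitution chain runs into a cycle of the mapping (no finite expansion depth).
def Pre_increase_degree (terms : List (List Int)) (mapping : List (Int × Int × Int)) : Prop :=
  ∀ term ∈ terms, ∀ v ∈ term,
    (pvDepth? (pvMapOf mapping) (pvMapOf mapping).size v).isSome = true

instance (terms : List (List Int)) (mapping : List (Int × Int × Int)) : Decidable (Pre_increase_degree terms mapping) := by unfold Pre_increase_degree; infer_instance

def pvWitness_increase_degree : List (List Int) × (List (Int × Int × Int)) :=
  ([[1, 2], [3]], [(1, 4, 5), (4, 6, 7)])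

def Spec_increase_degree (terms : List (List Int)) (mapping : List (Int × Int × Int)) (out : List (List Int)) : Prop := out = increase_degree_alt terms mapping
instance (terms : List (List Int)) (mapping : List (Int × Int × Int)) (out : List (List Int)) : Decidable (Spec_increase_degree terms mapping out) := by unfold Spec_increase_degree; infer_instance

-- ===== CLAIM (what is proved, stated in full; the proofs are below) =====
def Claim_equal_increase_degree : Prop := ∀ (terms : List (List Int)) (mapping : List (Int × Int × Int)), Dom_increase_degree terms mapping → Pre_increase_degree terms mapping → Spec_increase_degree terms mapping (increase_degree terms mapping)

-- ===== LEMMAS AND PROOFS =====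

theorem pvWitness_ok :
    Dom_increase_degree pvWitness_increase_degree.1 pvWitness_increase_degree.2 ∧
    Pre_increase_degree pvWitness_increase_degree.1 pvWitness_increase_degree.2 := by decide

-- ---- depth measure ----

theorem pvDepth?_zero (m : PySem.Dict Int (Int × Int)) (v : Int) :
    pvDepth? m 0 v = match m.get? v with | none => some 0 | some _ => none := rfl

theorem pvDepth?_succ (m : PySem.Dict Int (Int × Int)) (f : Nat) (v : Int) :
    pvDepth? m (f + 1) v = match m.get? v with
      | none => some 0
      | some ij =>
        match pvDepth? m f ij.1, pvDepth? m f ij.2 with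
        | some a, some b => some (max a b + 1)
        | _, _ => none := rfl

theorem pvDepth?_mono (m : PySem.Dict Int (Int × Int)) :
    ∀ (f : Nat) (v : Int) (d : Nat), pvDepth? m f v = some d → pvDepth? m (f + 1) v = some d := by
  intro f
  induction f with
  | zero =>
    intro v d h
    rw [pvDepth?_zero] at h
    rw [pvDepth?_succ]
    cases hv : m.get? v with
    | none => simp [hv] at h ⊢; omega
    | some ij => simp [hv] at h
  | succ f ih =>
    intro v d h
    rw [pvDepth?_succ] at h
    rw [pvDepth?_succ]
    cases hv : m.get? v with
    | none => simpa [hv] using h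
    | some ij =>
      simp only [hv] at h ⊢
      cases hi : pvDepth? m f ij.1 with
      | none => simp [hi] at h
      | some a =>
        cases hj : pvDepth? m f ij.2 with
        | none => simp [hi, hj] at h
        | some b =>
          rw [ih _ _ hi, ih _ _ hj]
          simp [hi, hj] at h
          simp [h]

theorem pvDepth?_le_fuel (m : PySem.Dict Int (Int × Int)) :
    ∀ (f : Nat) (v : Int) (d : Nat), pvDepth? m f v = some d → d ≤ f := by
  intro f
  induction f with
  | zero =>
    intro v d h
    rw [pvDepth?_zero] at h
    cases hv : m.get? v with
    | none => simp [hv] at h; omega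
    | some ij => simp [hv] at h
  | succ f ih =>
    intro v d h
    rw [pvDepth?_succ] at h
    cases hv : m.get? v with
    | none => simp [hv] at h; omega
    | some ij =>
      simp only [hv] at h
      cases hi : pvDepth? m f ij.1 with
      | none => simp [hi] at h
      | some a =>
        cases hj : pvDepth? m f ij.2 with
        | none => simp [hi, hj] at h
        | some b =>
          simp [hi, hj] at h
          have := ih ij.1 a hi
          have := ih ij.2 b hj
          omega

theorem pvDepth?_nonkey (m : PySem.Dict Int (Int × Int)) (f : Nat) (v : Int)
    (h : m.get? v = none) : pvDepth? m f v = some 0 := by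
  cases f
  · rw [pvDepth?_zero]; simp [h]
  · rw [pvDepth?_succ]; simp [h]

def pvDp (m : PySem.Dict Int (Int × Int)) (v : Int) : Nat := (pvDepth? m m.size v).getD 0

-- v has a finite expansion depth (its reachable subgraph is cycle-free)
def pvGood (m : PySem.Dict Int (Int × Int)) (v : Int) : Prop :=
  (pvDepth? m m.size v).isSome = true

theorem pvDp_spec {m : PySem.Dict Int (Int × Int)} {v : Int} (hg : pvGood m v) :
    pvDepth? m m.size v = some (pvDp m v) := by
  rcases Option.isSome_iff_exists.mp hg with ⟨d, hd⟩
  simp [pvDp, hd]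

theorem pvDp_key_decomp {m : PySem.Dict Int (Int × Int)} {v : Int} (hg : pvGood m v)
    {ij : Int × Int} (hv : m.get? v = some ij) :
    pvGood m ij.1 ∧ pvGood m ij.2 ∧
      pvDp m ij.1 < pvDp m v ∧ pvDp m ij.2 < pvDp m v ∧ 1 ≤ pvDp m v := by
  have hs := pvDp_spec hg
  cases hsz : m.size with
  | zero => rw [hsz, pvDepth?_zero] at hs; simp [hv] at hs
  | succ t =>
    rw [hsz, pvDepth?_succ] at hs
    simp only [hv] at hs
    cases hi : pvDepth? m t ij.1 with
    | none => simp [hi] at hs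
    | some a =>
      cases hj : pvDepth? m t ij.2 with
      | none => simp [hi, hj] at hs
      | some b =>
        simp [hi, hj] at hs
        have hi' : pvDepth? m m.size ij.1 = some a := by
          rw [hsz]; exact pvDepth?_mono m t ij.1 a hi
        have hj' : pvDepth? m m.size ij.2 = some b := by
          rw [hsz]; exact pvDepth?_mono m t ij.2 b hj
        have hdi : pvDp m ij.1 = a := by simp [pvDp, hi']
        have hdj : pvDp m ij.2 = b := by simp [pvDp, hj']
        refine ⟨by simp [pvGood, hi'], by simp [pvGood, hj'], by omega, by omega, by omega⟩

theorem pvDp_le_size {m : PySem.Dict Int (Int × Int)} {v : Int} (hg : pvGood m v) :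
    pvDp m v ≤ m.size :=
  pvDepth?_le_fuel m m.size v _ (pvDp_spec hg)

-- ---- terminal expansion ----

def pvTS (m : PySem.Dict Int (Int × Int)) : Nat → Int → Finset Int
  | 0, v => {v}
  | f + 1, v =>
    match m.get? v with
    | none => {v}
    | some ij => pvTS m f ij.1 ∪ pvTS m f ij.2

theorem pvTS_nonkey (m : PySem.Dict Int (Int × Int)) (f : Nat) (v : Int)
    (h : m.get? v = none) : pvTS m f v = {v} := by
  cases f <;> simp [pvTS, h]

theorem pvTS_stable (m : PySem.Dict Int (Int × Int)) :
    ∀ (f v d : _), pvDepth? m f v = some d → ∀ g, d ≤ g → pvTS m g v = pvTS m d v := by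
  intro f
  induction f with
  | zero =>
    intro v d h g hg
    rw [pvDepth?_zero] at h
    cases hv : m.get? v with
    | none => simp [hv] at h; subst h; rw [pvTS_nonkey m g v hv, pvTS_nonkey m 0 v hv]
    | some ij => simp [hv] at h
  | succ f ih =>
    intro v d h g hg
    rw [pvDepth?_succ] at h
    cases hv : m.get? v with
    | none => simp [hv] at h; subst h; rw [pvTS_nonkey m g v hv, pvTS_nonkey m 0 v hv]
    | some ij =>
      simp only [hv] at h
      cases hi : pvDepth? m f ij.1 with
      | none => simp [hi] at h
      | some a =>
        cases hj : pvDepth? m f ij.2 with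
        | none => simp [hi, hj] at h
        | some b =>
          simp [hi, hj] at h
          subst h
          obtain ⟨g', rfl⟩ : ∃ g', g = g' + 1 := ⟨g - 1, by omega⟩
          simp only [pvTS, hv]
          rw [ih ij.1 a hi g' (by omega), ih ij.2 b hj g' (by omega),
            ih ij.1 a hi (max a b) (by omega), ih ij.2 b hj (max a b) (by omega)]

def pvE (m : PySem.Dict Int (Int × Int)) (v : Int) : Finset Int := pvTS m (pvDp m v) v

theorem pvE_nonkey (m : PySem.Dict Int (Int × Int)) (v : Int)
    (h : m.get? v = none) : pvE m v = {v} := pvTS_nonkey m _ v h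

theorem pvE_key {m : PySem.Dict Int (Int × Int)} {v : Int} (hg : pvGood m v)
    {ij : Int × Int} (hv : m.get? v = some ij) : pvE m v = pvE m ij.1 ∪ pvE m ij.2 := by
  obtain ⟨hgi, hgj, h1, h2, h3⟩ := pvDp_key_decomp hg hv
  have hs := pvDp_spec hg
  cases hsz : m.size with
  | zero => rw [hsz, pvDepth?_zero] at hs; simp [hv] at hs
  | succ t =>
    rw [hsz, pvDepth?_succ] at hs
    simp only [hv] at hs
    cases hi : pvDepth? m t ij.1 with
    | none => simp [hi] at hs
    | some a =>
      cases hj : pvDepth? m t ij.2 with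
      | none => simp [hi, hj] at hs
      | some b =>
        simp [hi, hj] at hs
        have hi' : pvDepth? m m.size ij.1 = some a := by
          rw [hsz]; exact pvDepth?_mono m t ij.1 a hi
        have hj' : pvDepth? m m.size ij.2 = some b := by
          rw [hsz]; exact pvDepth?_mono m t ij.2 b hj
        have hdi : pvDp m ij.1 = a := by simp [pvDp, hi']
        have hdj : pvDp m ij.2 = b := by simp [pvDp, hj']
        unfold pvE
        have hdv : pvDp m v = max a b + 1 := by omega
        rw [hdv]
        simp only [pvTS, hv]
        rw [pvTS_stable m m.size ij.1 _ hi' (max a b) (by omega),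
          pvTS_stable m m.size ij.2 _ hj' (max a b) (by omega), hdi, hdj]

def pvEU (m : PySem.Dict Int (Int × Int)) (S : List Int) : Finset Int :=
  S.foldr (fun v acc => pvE m v ∪ acc) ∅

theorem mem_pvEU (m : PySem.Dict Int (Int × Int)) (S : List Int) (x : Int) :
    x ∈ pvEU m S ↔ ∃ v ∈ S, x ∈ pvE m v := by
  induction S with
  | nil => simp [pvEU]
  | cons v S ih => simp [pvEU] at ih ⊢; rw [ih]

-- ---- A side: pass and loop ----

theorem idPass_false (m : PySem.Dict Int (Int × Int)) :
    ∀ (snap : List Int) (s : PySem.Set Int), (idPass m snap (s, false)).2 = false := by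
  intro snap
  induction snap with
  | nil => intro s; rfl
  | cons v rest ih =>
    intro s
    simp only [idPass, List.foldl_cons]
    cases hv : m.get? v with
    | none => simpa [hv] using ih s
    | some ij => simpa [hv] using ih _

theorem idPass_id (m : PySem.Dict Int (Int × Int)) :
    ∀ (snap : List Int) (s : PySem.Set Int) (b : Bool),
      (∀ v ∈ snap, m.get? v = none) → idPass m snap (s, b) = (s, b) := by
  intro snap
  induction snap with
  | nil => intro s b _; rfl
  | cons v rest ih =>
    intro s b h
    simp only [idPass, List.foldl_cons]
    have hv := h v (by simp)
    simpa [hv] using ih s b (fun w hw => h w (by simp [hw]))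

theorem pvEU_subst {m : PySem.Dict Int (Int × Int)} {v : Int} (hg : pvGood m v)
    {ij : Int × Int} (hv : m.get? v = some ij) {s : PySem.Set Int} (hmem : v ∈ s) :
    pvEU m (PySem.Set.update (PySem.Set.discard s v) [ij.1, ij.2]) = pvEU m s := by
  apply Finset.ext
  intro x
  rw [mem_pvEU, mem_pvEU]
  constructor
  · rintro ⟨w, hwmem, hx⟩
    rw [PySem.Set.mem_update] at hwmem
    rcases hwmem with hwmem | hwmem
    · rw [PySem.Set.mem_discard] at hwmem
      exact ⟨w, hwmem.1, hx⟩
    · refine ⟨v, hmem, ?_⟩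
      rw [pvE_key hg hv, Finset.mem_union]
      simp at hwmem
      rcases hwmem with rfl | rfl
      · exact Or.inl hx
      · exact Or.inr hx
  · rintro ⟨w, hwmem, hx⟩
    by_cases hwv : w = v
    · subst hwv
      rw [pvE_key hg hv, Finset.mem_union] at hx
      rcases hx with hx | hx
      · exact ⟨ij.1, by rw [PySem.Set.mem_update]; simp, hx⟩
      · exact ⟨ij.2, by rw [PySem.Set.mem_update]; simp, hx⟩
    · exact ⟨w, by rw [PySem.Set.mem_update, PySem.Set.mem_discard]; exact Or.inl ⟨hwmem, hwv⟩, hx⟩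

theorem idPass_spec (m : PySem.Dict Int (Int × Int)) :
    ∀ (snap : List Int) (s : PySem.Set Int) (b : Bool), snap.Nodup → s.Nodup →
      (∀ w ∈ snap, w ∈ s) → (∀ w ∈ s, pvGood m w) →
      (idPass m snap (s, b)).1.Nodup ∧
      (∀ w ∈ (idPass m snap (s, b)).1, pvGood m w) ∧
      pvEU m (idPass m snap (s, b)).1 = pvEU m s ∧
      (∀ x ∈ (idPass m snap (s, b)).1,
        (x ∈ s ∧ (m.get? x = none ∨ x ∉ snap)) ∨
        ∃ v ∈ snap, ∃ ij, m.get? v = some ij ∧ (x = ij.1 ∨ x = ij.2)) ∧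
      ((idPass m snap (s, b)).2 = true → (idPass m snap (s, b)).1 = s ∧ ∀ v ∈ snap, m.get? v = none) := by
  intro snap
  induction snap with
  | nil =>
    intro s b _ hs _ hgs
    refine ⟨hs, hgs, rfl, ?_, ?_⟩
    · intro x hx; exact Or.inl ⟨hx, Or.inr (by simp)⟩
    · intro _; exact ⟨rfl, by simp⟩
  | cons v rest ih =>
    intro s b hsnap hs hsub hgs
    have hvs : v ∈ s := hsub v (by simp)
    have hgv : pvGood m v := hgs v hvs
    have hrest_nd : rest.Nodup := (List.nodup_cons.mp hsnap).2
    have hvrest : v ∉ rest := (List.nodup_cons.mp hsnap).1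
    cases hv : m.get? v with
    | none =>
      have heq : idPass m (v :: rest) (s, b) = idPass m rest (s, b) := by
        simp [idPass, hv]
      rw [heq]
      obtain ⟨h1, hg1, h2, h3, h4⟩ := ih s b hrest_nd hs (fun w hw => hsub w (by simp [hw])) hgs
      refine ⟨h1, hg1, h2, ?_, ?_⟩
      · intro x hx
        rcases h3 x hx with ⟨hxs, hck⟩ | ⟨u, hu, ij, hij, hxij⟩
        · refine Or.inl ⟨hxs, ?_⟩
          rcases hck with hck | hck
          · exact Or.inl hck
          · by_cases hxv : x = v
            · subst hxv; exact Or.inl hv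
            · exact Or.inr (by simp [hxv, hck])
        · exact Or.inr ⟨u, by simp [hu], ij, hij, hxij⟩
      · intro hb
        obtain ⟨he, hk⟩ := h4 hb
        exact ⟨he, by intro u hu; rcases List.mem_cons.mp hu with rfl | hu
                      · exact hv
                      · exact hk u hu⟩
    | some ij =>
      obtain ⟨hgi, hgj, _, _, _⟩ := pvDp_key_decomp hgv hv
      have heq : idPass m (v :: rest) (s, b) =
          idPass m rest (PySem.Set.update (PySem.Set.discard s v) [ij.1, ij.2], false) := by
        simp [idPass, hv]
      have hs' : (PySem.Set.update (PySem.Set.discard s v) [ij.1, ij.2]).Nodup :=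
        PySem.Set.nodup_update _ _ (PySem.Set.nodup_discard _ _ hs)
      have hsub' : ∀ w ∈ rest, w ∈ PySem.Set.update (PySem.Set.discard s v) [ij.1, ij.2] := by
        intro w hwr
        rw [PySem.Set.mem_update, PySem.Set.mem_discard]
        exact Or.inl ⟨hsub w (by simp [hwr]), fun hwv => hvrest (hwv ▸ hwr)⟩
      have hgs' : ∀ w ∈ PySem.Set.update (PySem.Set.discard s v) [ij.1, ij.2], pvGood m w := by
        intro w hwmem
        rw [PySem.Set.mem_update, PySem.Set.mem_discard] at hwmem
        rcases hwmem with ⟨hws, _⟩ | hwij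
        · exact hgs w hws
        · simp at hwij
          rcases hwij with rfl | rfl
          · exact hgi
          · exact hgj
      rw [heq]
      obtain ⟨h1, hg1, h2, h3, h4⟩ := ih _ false hrest_nd hs' hsub' hgs'
      refine ⟨h1, hg1, by rw [h2, pvEU_subst hgv hv hvs], ?_, ?_⟩
      · intro x hx
        rcases h3 x hx with ⟨hxs, hck⟩ | ⟨u, hu, ij', hij', hxij'⟩
        · rw [PySem.Set.mem_update, PySem.Set.mem_discard] at hxs
          rcases hxs with ⟨⟨hxss, hxv⟩⟩ | hxij
          · refine Or.inl ⟨hxss, ?_⟩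
            rcases hck with hck | hck
            · exact Or.inl hck
            · exact Or.inr (by simp [hxv, hck])
          · refine Or.inr ⟨v, by simp, ij, hv, ?_⟩
            simpa using hxij
        · exact Or.inr ⟨u, by simp [hu], ij', hij', hxij'⟩
      · intro hb
        have := idPass_false m rest (PySem.Set.update (PySem.Set.discard s v) [ij.1, ij.2])
        rw [this] at hb
        exact absurd hb (by simp)

theorem idLoop_spec (m : PySem.Dict Int (Int × Int)) :
    ∀ (fuel : Nat) (s : PySem.Set Int), s.Nodup → (∀ x ∈ s, pvGood m x) →
      (∀ x ∈ s, pvDp m x < fuel) →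
      (idLoop m fuel s).Nodup ∧ pvEU m (idLoop m fuel s) = pvEU m s ∧
      ∀ x ∈ idLoop m fuel s, m.get? x = none := by
  intro fuel
  induction fuel with
  | zero =>
    intro s hs _ hdp
    exact ⟨hs, rfl, fun x hx => absurd (hdp x hx) (by omega)⟩
  | succ f ih =>
    intro s hs hgs hdp
    obtain ⟨h1, hg1, h2, h3, h4⟩ := idPass_spec m s s true hs hs (fun w hw => hw) hgs
    by_cases hdone : (idPass m s (s, true)).2 = true
    · obtain ⟨he, hk⟩ := h4 hdone
      have hloop : idLoop m (f + 1) s = s := by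
        simp only [idLoop, hdone, if_true, he]
      rw [hloop]
      exact ⟨hs, rfl, hk⟩
    · have hloop : idLoop m (f + 1) s = idLoop m f (idPass m s (s, true)).1 := by
        simp only [idLoop]
        simp [hdone]
      have hkey : ∃ v ∈ s, ∃ ij, m.get? v = some ij := by
        by_contra hnone
        push Not at hnone
        have : ∀ v ∈ s, m.get? v = none := by
          intro v hv
          cases hg : m.get? v with
          | none => rfl
          | some ij => exact absurd hg (hnone v hv ij)
        have := idPass_id m s s true this
        rw [this] at hdone
        exact hdone rfl
      obtain ⟨v0, hv0s, ij0, hv0⟩ := hkey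
      have hf1 : 1 ≤ f := by
        have := (pvDp_key_decomp (hgs v0 hv0s) hv0).2.2.2.2
        have := hdp v0 hv0s
        omega
      have hdp' : ∀ x ∈ (idPass m s (s, true)).1, pvDp m x < f := by
        intro x hx
        rcases h3 x hx with ⟨hxs, hck⟩ | ⟨u, hu, ij, hij, hxij⟩
        · rcases hck with hck | hck
          · have : pvDp m x = 0 := by simp [pvDp, pvDepth?_nonkey m _ x hck]
            omega
          · exact absurd hxs hck
        · obtain ⟨_, _, hlt1, hlt2, _⟩ := pvDp_key_decomp (hgs u hu) hij
          have := hdp u hu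
          rcases hxij with rfl | rfl <;> omega
      rw [hloop]
      obtain ⟨g1, g2, g3⟩ := ih _ h1 hg1 hdp'
      exact ⟨g1, by rw [g2, h2], g3⟩

-- ---- B side: memoized expansion ----

def pvInv (m : PySem.Dict Int (Int × Int)) (memo : PySem.Dict Int (PySem.Set Int)) : Prop :=
  ∀ p ∈ memo.items, p.2.Nodup ∧ ∀ x, x ∈ p.2 ↔ x ∈ pvE m p.1

theorem pvInv_empty (m : PySem.Dict Int (Int × Int)) : pvInv m PySem.Dict.empty := by
  intro p hp
  simp [PySem.Dict.empty] at hp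

theorem altExpand_spec (m : PySem.Dict Int (Int × Int)) :
    ∀ (f : Nat) (v : Int) (memo : PySem.Dict Int (PySem.Set Int)), pvGood m v →
      pvDp m v < f → pvInv m memo → memo.keys.Nodup →
      (altExpand m f v memo).1.Nodup ∧
      (∀ x, x ∈ (altExpand m f v memo).1 ↔ x ∈ pvE m v) ∧
      pvInv m (altExpand m f v memo).2 ∧ (altExpand m f v memo).2.keys.Nodup := by
  intro f
  induction f with
  | zero => intro v memo _ h _ _; omega
  | succ f ih =>
    intro v memo hgv hdp hinv hnd
    cases hmemo : memo.get? v with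
    | some s =>
      have heq : altExpand m (f + 1) v memo = (s, memo) := by
        simp [altExpand, hmemo]
      rw [heq]
      have hmem := PySem.Dict.mem_items_of_get?_eq_some (d := memo) hmemo
      obtain ⟨hnds, hmems⟩ := hinv _ hmem
      exact ⟨hnds, hmems, hinv, hnd⟩
    | none =>
      cases hv : m.get? v with
      | some ij =>
        have heq : altExpand m (f + 1) v memo =
            (PySem.Set.union (altExpand m f ij.1 memo).1
              (altExpand m f ij.2 (altExpand m f ij.1 memo).2).1,
             ((altExpand m f ij.2 (altExpand m f ij.1 memo).2).2).insert v
               (PySem.Set.union (altExpand m f ij.1 memo).1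
                 (altExpand m f ij.2 (altExpand m f ij.1 memo).2).1)) := by
          simp [altExpand, hmemo, hv]
        obtain ⟨hgi, hgj, hlt1, hlt2, _⟩ := pvDp_key_decomp hgv hv
        obtain ⟨i1, i2, i3, i4⟩ := ih ij.1 memo hgi (by omega) hinv hnd
        obtain ⟨j1, j2, j3, j4⟩ := ih ij.2 _ hgj (by omega) i3 i4
        rw [heq]
        refine ⟨PySem.Set.nodup_union _ _ i1, ?_, ?_, ?_⟩
        · intro x
          rw [PySem.Set.mem_union, pvE_key hgv hv, Finset.mem_union, i2, j2]
        · intro p hp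
          rw [PySem.Dict.mem_items_insert] at hp
          rcases hp with rfl | ⟨hp, _⟩
          · refine ⟨PySem.Set.nodup_union _ _ i1, ?_⟩
            intro x
            rw [PySem.Set.mem_union, pvE_key hgv hv, Finset.mem_union, i2, j2]
          · exact j3 _ hp
        · exact PySem.Dict.nodup_keys_insert _ _ _ j4
      | none =>
        have heq : altExpand m (f + 1) v memo =
            (PySem.Set.ofList [v], memo.insert v (PySem.Set.ofList [v])) := by
          simp [altExpand, hmemo, hv]
        rw [heq]
        refine ⟨PySem.Set.nodup_ofList _, ?_, ?_, PySem.Dict.nodup_keys_insert _ _ _ hnd⟩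
        · intro x
          rw [pvE_nonkey m v hv]
          simp [PySem.Set.ofList]
        · intro p hp
          rw [PySem.Dict.mem_items_insert] at hp
          rcases hp with rfl | ⟨hp, _⟩
          · refine ⟨PySem.Set.nodup_ofList _, ?_⟩
            intro x
            rw [pvE_nonkey m v hv]
            simp [PySem.Set.ofList]
          · exact hinv _ hp

theorem altTerm_spec (m : PySem.Dict Int (Int × Int)) (F : Nat)
    (hF : ∀ v : Int, pvGood m v → pvDp m v < F) :
    ∀ (term : List Int) (acc : PySem.Set Int) (memo : PySem.Dict Int (PySem.Set Int)),
      (∀ v ∈ term, pvGood m v) → acc.Nodup → pvInv m memo → memo.keys.Nodup →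
      (term.foldl (fun p v => ((PySem.Set.union p.1 (altExpand m F v p.2).1 : PySem.Set Int),
          (altExpand m F v p.2).2)) (acc, memo)).1.Nodup ∧
      (∀ x, x ∈ (term.foldl (fun p v => ((PySem.Set.union p.1 (altExpand m F v p.2).1 : PySem.Set Int),
          (altExpand m F v p.2).2)) (acc, memo)).1 ↔ x ∈ acc ∨ ∃ v ∈ term, x ∈ pvE m v) ∧
      pvInv m (term.foldl (fun p v => ((PySem.Set.union p.1 (altExpand m F v p.2).1 : PySem.Set Int),
          (altExpand m F v p.2).2)) (acc, memo)).2 ∧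
      (term.foldl (fun p v => ((PySem.Set.union p.1 (altExpand m F v p.2).1 : PySem.Set Int),
          (altExpand m F v p.2).2)) (acc, memo)).2.keys.Nodup := by
  intro term
  induction term with
  | nil =>
    intro acc memo _ hacc hinv hnd
    exact ⟨hacc, by simp, hinv, hnd⟩
  | cons v term ih =>
    intro acc memo hgood hacc hinv hnd
    have hgv : pvGood m v := hgood v (by simp)
    obtain ⟨e1, e2, e3, e4⟩ := altExpand_spec m F v memo hgv (hF v hgv) hinv hnd
    simp only [List.foldl_cons]
    obtain ⟨g1, g2, g3, g4⟩ := ih (PySem.Set.union acc (altExpand m F v memo).1)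
      (altExpand m F v memo).2 (fun u hu => hgood u (by simp [hu]))
      (PySem.Set.nodup_union _ _ hacc) e3 e4
    refine ⟨g1, ?_, g3, g4⟩
    intro x
    rw [g2 x, PySem.Set.mem_union, e2 x]
    constructor
    · rintro ((hx | hx) | ⟨u, hu, hx⟩)
      · exact Or.inl hx
      · exact Or.inr ⟨v, by simp, hx⟩
      · exact Or.inr ⟨u, by simp [hu], hx⟩
    · rintro (hx | ⟨u, hu, hx⟩)
      · exact Or.inl (Or.inl hx)
      · rcases List.mem_cons.mp hu with rfl | hu
        · exact Or.inl (Or.inr hx)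
        · exact Or.inr ⟨u, hu, hx⟩

-- ---- sizes and the per-term output ----

theorem pvSize_foldl_le (l : List (Int × Int × Int)) :
    ∀ d : PySem.Dict Int (Int × Int),
      (l.foldl (fun d t => d.insert t.1 (t.2.1, t.2.2)) d).size ≤ d.size + l.length := by
  induction l with
  | nil => intro d; simp
  | cons t l ih =>
    intro d
    simp only [List.foldl_cons, List.length_cons]
    have h1 := ih (d.insert t.1 (t.2.1, t.2.2))
    have h2 : (d.insert t.1 (t.2.1, t.2.2)).size ≤ d.size + 1 := by
      by_cases hc : d.contains t.1 = true
      · simp [PySem.Dict.size_insert, hc]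
      · simp [PySem.Dict.size_insert, hc]
    omega

theorem term_out_eq (m : PySem.Dict Int (Int × Int)) (F : Nat)
    (hF : ∀ v : Int, pvGood m v → pvDp m v < F) (term : List Int)
    (hgood : ∀ v ∈ term, pvGood m v)
    (sb : PySem.Set Int) (hnb : sb.Nodup)
    (hmb : ∀ x, x ∈ sb ↔ ∃ v ∈ term, x ∈ pvE m v) :
    PySem.List.sorted (idLoop m F (PySem.Set.ofList term)) (fun x => x) false =
    PySem.List.sorted sb (fun x => x) false := by
  have hgood' : ∀ x ∈ PySem.Set.ofList term, pvGood m x := by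
    intro x hx
    exact hgood x ((PySem.Set.mem_ofList _ _).mp hx)
  obtain ⟨a1, a2, a3⟩ := idLoop_spec m F (PySem.Set.ofList term)
    (PySem.Set.nodup_ofList term) hgood' (fun x hx => hF x (hgood' x hx))
  have hma : ∀ x, x ∈ idLoop m F (PySem.Set.ofList term) ↔ ∃ v ∈ term, x ∈ pvE m v := by
    intro x
    constructor
    · intro hx
      have : x ∈ pvEU m (idLoop m F (PySem.Set.ofList term)) := by
        rw [mem_pvEU]
        exact ⟨x, hx, by rw [pvE_nonkey m x (a3 x hx)]; simp⟩
      rw [a2, mem_pvEU] at this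
      obtain ⟨v, hv, hxv⟩ := this
      exact ⟨v, (PySem.Set.mem_ofList _ _).mp hv, hxv⟩
    · intro ⟨v, hv, hxv⟩
      have : x ∈ pvEU m (PySem.Set.ofList term) := by
        rw [mem_pvEU]
        exact ⟨v, (PySem.Set.mem_ofList _ _).mpr hv, hxv⟩
      rw [← a2, mem_pvEU] at this
      obtain ⟨u, hu, hxu⟩ := this
      rw [pvE_nonkey m u (a3 u hu)] at hxu
      simp at hxu
      subst hxu
      exact hu
  have hperm : (idLoop m F (PySem.Set.ofList term)).Perm sb := by
    rw [List.perm_ext_iff_of_nodup a1 hnb]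
    intro x
    rw [hma x, hmb x]
  exact PySem.List.sorted_eq_sorted_of_perm _ _ _ (fun a b h => h) hperm

theorem outer_eq (m : PySem.Dict Int (Int × Int)) (F : Nat)
    (hF : ∀ v : Int, pvGood m v → pvDp m v < F) :
    ∀ (terms : List (List Int)), (∀ term ∈ terms, ∀ v ∈ term, pvGood m v) →
      ∀ (big : List (List Int))
      (memo : PySem.Dict Int (PySem.Set Int)), pvInv m memo → memo.keys.Nodup →
      terms.foldl (fun big term =>
        big ++ [PySem.List.sorted (idLoop m F (PySem.Set.ofList term)) (fun x => x) false]) big =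
      (terms.foldl (fun (st : List (List Int) × PySem.Dict Int (PySem.Set Int)) term =>
        (st.1 ++ [PySem.List.sorted (term.foldl (fun p v =>
            ((PySem.Set.union p.1 (altExpand m F v p.2).1 : PySem.Set Int),
              (altExpand m F v p.2).2)) (PySem.Set.empty, st.2)).1 (fun x => x) false],
          (term.foldl (fun p v => ((PySem.Set.union p.1 (altExpand m F v p.2).1 : PySem.Set Int),
            (altExpand m F v p.2).2)) (PySem.Set.empty, st.2)).2)) (big, memo)).1 := by
  intro terms
  induction terms with
  | nil => intro _ big memo _ _; rfl
  | cons term terms ih =>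
    intro hgood big memo hinv hnd
    simp only [List.foldl_cons]
    obtain ⟨t1, t2, t3, t4⟩ := altTerm_spec m F hF term PySem.Set.empty memo
      (hgood term (by simp)) (by simp [PySem.Set.empty]) hinv hnd
    have hsorted := term_out_eq m F hF term (hgood term (by simp)) _ t1
      (by intro x; rw [t2 x]; simp [PySem.Set.empty])
    rw [hsorted]
    exact ih (fun t ht v hv => hgood t (by simp [ht]) v hv) _ _ t3 t4

-- ===== VERDICT (by name: the statement is the Claim_ definition above) =====
theorem increase_degree_spec : Claim_equal_increase_degree := by
  intro terms mapping _ hpre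
  unfold Spec_increase_degree increase_degree increase_degree_alt
  have hmm : idMapA mapping = pvMapOf mapping := rfl
  have hma : altMap mapping = pvMapOf mapping := rfl
  rw [hmm, hma]
  have hF : ∀ v : Int, pvGood (pvMapOf mapping) v → pvDp (pvMapOf mapping) v < mapping.length + 1 := by
    intro v hg
    have h1 := pvDp_le_size hg
    have h2 : (pvMapOf mapping).size ≤ mapping.length := by
      have := pvSize_foldl_le mapping PySem.Dict.empty
      simpa [pvMapOf, PySem.Dict.empty, PySem.Dict.size] using this
    omega
  exact outer_eq (pvMapOf mapping) (mapping.length + 1) hF terms hpre [] PySem.Dict.empty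
    (pvInv_empty _) (by simp [PySem.Dict.empty, PySem.Dict.keys])
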